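-- pv_equiv track=rewrite | github.com/k-min9/TIL | 00. Daily Algorithm/Programmers/월간코드챌린지2021_S3_2_02.py | solution
-- ===== SOURCE A (Python) =====
-- def solution(n, left, right):
--     answer = []
--
--     x = left%n
--     y = left//n
--
--     for _ in range(right-left+1):
--         if x<=y:
--             answer.append(y+1)
--         else:
--             answer.append(x+1)
--         x+=1
--         if x==n:
--             x=0
--             y+=1
--
--     return answer
-- ===== SOURCE B (Python) =====
-- def solution(n, left, right):
--     if right < left:
--         return []
--     out = []
--     first, last = left // n, right // n
--     for y in range(first, last + 1):
--         lo = left % n if y == first else 0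
--         hi = right % n + 1 if y == last else n
--         k = min(max(y + 1, 0), n)  # columns of row y that hold the row value y+1
--         out += [y + 1] * max(min(k, hi) - lo, 0)
--         out += range(max(lo, k) + 1, hi + 1)
--     return out
-- ===== Notes on version B (the rewrite author's own statement) =====
-- stated objective: faster
-- what changed: B replaces A's per-index carry loop with a row-block construction: it iterates over grid rows and emits each row's contribution as one replicated block of the row value plus one arithmetic range, trimming the first and last rows to the index window.
-- outside the precondition, e.g. on solution(-2, 0, 1): A returns [1, 2], B returns []
import Mathlib
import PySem

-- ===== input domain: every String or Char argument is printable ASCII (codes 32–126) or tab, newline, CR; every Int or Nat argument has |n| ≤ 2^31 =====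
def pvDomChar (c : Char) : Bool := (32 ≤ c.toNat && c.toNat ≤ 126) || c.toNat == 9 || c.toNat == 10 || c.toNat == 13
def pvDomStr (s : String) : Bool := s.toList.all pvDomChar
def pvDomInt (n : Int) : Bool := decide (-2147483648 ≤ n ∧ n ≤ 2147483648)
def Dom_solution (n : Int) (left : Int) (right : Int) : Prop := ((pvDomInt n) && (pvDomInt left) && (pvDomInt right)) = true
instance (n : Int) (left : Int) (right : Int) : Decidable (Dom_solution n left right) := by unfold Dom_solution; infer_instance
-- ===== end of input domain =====

-- B builds the answer row by row in bulk blocks (replicate + range per row) instead of A's per-index carry loop (objective: faster, constant-factor: bulk list operations; measured faster in a timing run).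


-- ===== PORT A =====
-- literal transliteration of A: counter loop over range(right-left+1) carrying (x, y, answer)
def solution (n : Int) (left : Int) (right : Int) : List Int :=
  let x := PySem.Int.mod left n
  let y := PySem.Int.floordiv left n
  let s := (List.range (right - left + 1).toNat).foldl
    (fun (s : Int × Int × List Int) _ =>
      let x := s.1
      let y := s.2.1
      let answer := s.2.2
      let answer := if x ≤ y then answer ++ [y + 1] else answer ++ [x + 1]
      let x := x + 1
      if x = n then (0, y + 1, answer) else (x, y, answer))
    (x, y, ([] : List Int))
  s.2.2

-- ===== PORT B =====
-- literal transliteration of B: row-block construction, one replicate + one range per grid row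
def solution_alt (n : Int) (left : Int) (right : Int) : List Int :=
  if right < left then []
  else
    let first := PySem.Int.floordiv left n
    let last := PySem.Int.floordiv right n
    (PySem.List.pyRange first (last + 1) 1).foldl
      (fun (out : List Int) y =>
        let lo := if y = first then PySem.Int.mod left n else 0
        let hi := if y = last then PySem.Int.mod right n + 1 else n
        let k := min (max (y + 1) 0) n
        out ++ List.replicate (max (min k hi - lo) 0).toNat (y + 1)
            ++ PySem.List.pyRange (max lo k + 1) (hi + 1) 1)
      []

-- ===== PRECONDITION & SPEC =====
-- Pre_ admits the problem's natural domain n ≥ 1 (an n×n grid) plus every empty-range input with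
-- n ≠ 0. Excluded: n = 0 (A raises ZeroDivisionError from the pre-loop 'left % n'), and n < 0 with a
-- nonempty range, where A's carry test 'x == n' can never fire — an artefact of its implementation.
def Pre_solution (n : Int) (left : Int) (right : Int) : Prop := 1 ≤ n ∨ (n ≠ 0 ∧ right < left)
instance (n : Int) (left : Int) (right : Int) : Decidable (Pre_solution n left right) := by unfold Pre_solution; infer_instance
def pvWitness_solution : Int × Int × Int := (3, 2, 5)

def Spec_solution (n : Int) (left : Int) (right : Int) (out : List Int) : Prop := out = solution_alt n left right
instance (n : Int) (left : Int) (right : Int) (out : List Int) : Decidable (Spec_solution n left right out) := by unfold Spec_solution; infer_instance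

-- ===== CLAIM (what is proved, stated in full; the proofs are below) =====
def Claim_equal_solution : Prop := ∀ (n : Int) (left : Int) (right : Int), Dom_solution n left right → Pre_solution n left right → Spec_solution n left right (solution n left right)

-- ===== LEMMAS AND PROOFS =====

-- The single loop step of A's port, named for the invariant lemma.
def pvStep (n : Int) (s : Int × Int × List Int) : Int × Int × List Int :=
  let x := s.1
  let y := s.2.1
  let answer := s.2.2
  let answer := if x ≤ y then answer ++ [y + 1] else answer ++ [x + 1]
  let x := x + 1
  if x = n then (0, y + 1, answer) else (x, y, answer)

lemma pvStep_state (n i : Int) (acc : List Int) (hn : 1 ≤ n) :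
    pvStep n (PySem.Int.mod i n, PySem.Int.floordiv i n, acc)
      = (PySem.Int.mod (i + 1) n, PySem.Int.floordiv (i + 1) n,
         acc ++ [max (PySem.Int.floordiv i n) (PySem.Int.mod i n) + 1]) := by
  have hn0 : (0 : Int) < n := by omega
  rw [PySem.Int.mod_eq_emod_of_pos (a := i) hn0, PySem.Int.mod_eq_emod_of_pos (a := i+1) hn0,
      PySem.Int.floordiv_eq_ediv_of_pos (a := i) hn0, PySem.Int.floordiv_eq_ediv_of_pos (a := i+1) hn0]
  have hlo := Int.emod_nonneg i (by omega : n ≠ 0)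
  have hhi := Int.emod_lt_of_pos i hn0
  have e1 := Int.emod_add_ediv i n
  simp only [pvStep]
  have hval : (if i % n ≤ i / n then acc ++ [i / n + 1] else acc ++ [i % n + 1])
      = acc ++ [max (i / n) (i % n) + 1] := by
    split_ifs with h
    · have hmax : max (i / n) (i % n) = i / n := by omega
      rw [hmax]
    · have hmax : max (i / n) (i % n) = i % n := by omega
      rw [hmax]
  rw [hval]
  split_ifs with hc
  · have hi1 : i + 1 = n * (i / n + 1) := by linarith
    have hd : (i + 1) / n = i / n + 1 := by
      rw [hi1, Int.mul_ediv_cancel_left _ (by omega : n ≠ 0)]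
    have hm : (i + 1) % n = 0 := by rw [hi1, Int.mul_emod_right]
    rw [hd, hm]
  · have hi1 : i + 1 = (i % n + 1) + n * (i / n) := by linarith
    have hm : (i + 1) % n = i % n + 1 := by
      rw [hi1, Int.add_mul_emod_self_left, Int.emod_eq_of_lt (by omega) (by omega)]
    have hd : (i + 1) / n = i / n := by
      rw [hi1, Int.add_mul_ediv_left _ _ (by omega : n ≠ 0),
          Int.ediv_eq_zero_of_lt (by omega) (by omega), zero_add]
    rw [hd, hm]

lemma pvFold_invariant (n : Int) (hn : 1 ≤ n) (i : Int) (acc : List Int) :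
    ∀ (k : Nat),
      (List.range k).foldl (fun s _ => pvStep n s) (PySem.Int.mod i n, PySem.Int.floordiv i n, acc)
        = (PySem.Int.mod (i + k) n, PySem.Int.floordiv (i + k) n,
           acc ++ (List.range k).map (fun (j : Nat) => max (PySem.Int.floordiv (i + (j : Int)) n) (PySem.Int.mod (i + (j : Int)) n) + 1)) := by
  intro k
  induction k with
  | zero => simp
  | succ m ih =>
    rw [List.range_succ, List.foldl_append, ih, List.map_append]
    simp only [List.foldl_cons, List.foldl_nil, List.map_cons, List.map_nil]
    have hstep := pvStep_state n (i + m) (acc ++ (List.range m).map (fun (j : Nat) => max (PySem.Int.floordiv (i + (j : Int)) n) (PySem.Int.mod (i + (j : Int)) n) + 1)) hn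
    rw [hstep]
    have hcast : i + ↑m + 1 = i + ↑(m + 1) := by push_cast; ring
    rw [hcast, List.append_assoc]

-- A computes the per-index map over the flat range.
lemma solution_eq_map (n left right : Int) (hn : 1 ≤ n) :
    solution n left right
      = (PySem.List.pyRange left (right + 1) 1).map (fun i => max (i / n) (i % n) + 1) := by
  show (let x := PySem.Int.mod left n;
    let y := PySem.Int.floordiv left n;
    let s := (List.range (right - left + 1).toNat).foldl (fun s _ => pvStep n s) (x, y, []);
    s.2.2) = _
  simp only
  rw [pvFold_invariant n hn left [] (right - left + 1).toNat]
  rw [PySem.List.pyRange_one left (right + 1)]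
  simp only [List.nil_append, List.map_map]
  have : (right + 1 - left).toNat = (right - left + 1).toNat := by omega
  rw [this]
  apply List.map_congr_left
  intro j _
  have h0 : (0:Int) < n := by omega
  simp [Function.comp, PySem.Int.mod_eq_emod_of_pos, PySem.Int.floordiv_eq_ediv_of_pos, h0]

-- div/mod of an in-row flat index.
lemma row_divmod (n y x : Int) (_hn : 1 ≤ n) (hx0 : 0 ≤ x) (hxn : x < n) :
    (n * y + x) / n = y ∧ (n * y + x) % n = x := by
  constructor
  · rw [show n * y + x = x + n * y by ring, Int.add_mul_ediv_left _ _ (by omega : n ≠ 0),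
        Int.ediv_eq_zero_of_lt hx0 hxn, zero_add]
  · rw [show n * y + x = x + n * y by ring, Int.add_mul_emod_self_left,
        Int.emod_eq_of_lt hx0 hxn]

-- Row piece correctness: replicate + range over a column window equals the per-column map.
lemma piece_eq_map (n y : Int) (hn : 1 ≤ n) :
    ∀ (m : Nat) (lo hi : Int), 0 ≤ lo → hi - lo = m → hi ≤ n →
      List.replicate (max (min (min (max (y + 1) 0) n) hi - lo) 0).toNat (y + 1)
          ++ PySem.List.pyRange (max lo (min (max (y + 1) 0) n) + 1) (hi + 1) 1
        = (PySem.List.pyRange lo hi 1).map (fun x => max x y + 1) := by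
  intro m
  induction m with
  | zero =>
    intro lo hi hlo hm hhin
    have hle : hi ≤ lo := by omega
    have h1 : (max (min (min (max (y + 1) 0) n) hi - lo) 0).toNat = 0 := by
      have : min (min (max (y + 1) 0) n) hi ≤ hi := min_le_right _ _
      omega
    have h2 : PySem.List.pyRange (max lo (min (max (y + 1) 0) n) + 1) (hi + 1) 1 = [] :=
      PySem.List.pyRange_one_eq_nil (by
        have : lo ≤ max lo (min (max (y + 1) 0) n) := le_max_left _ _
        omega)
    rw [h1, h2, PySem.List.pyRange_one_eq_nil hle]
    simp
  | succ m ih =>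
    intro lo hi hlo hm hhin
    have hlt : lo < hi := by omega
    rw [PySem.List.pyRange_one_cons hlt, List.map_cons]
    by_cases hk : lo < min (max (y + 1) 0) n
    · -- replicated part still running: head is y+1
      have hloy : lo ≤ y := by
        have h1 : lo < max (y + 1) 0 := lt_of_lt_of_le hk (min_le_left _ _)
        omega
      have hhead : max lo y + 1 = y + 1 := by omega
      have hcnt : (max (min (min (max (y + 1) 0) n) hi - lo) 0).toNat
          = ((max (min (min (max (y + 1) 0) n) hi - (lo + 1)) 0).toNat) + 1 := by
        have h2 : lo + 1 ≤ min (min (max (y + 1) 0) n) hi := by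
          have := le_min (by omega : lo + 1 ≤ min (max (y + 1) 0) n) (by omega : lo + 1 ≤ hi)
          omega
        omega
      have hmax : max lo (min (max (y + 1) 0) n) = max (lo + 1) (min (max (y + 1) 0) n) := by
        omega
      rw [hcnt, List.replicate_succ, List.cons_append, hmax,
          ih (lo + 1) hi (by omega) (by omega) hhin, hhead]
    · -- replicate exhausted: head comes from the range part
      push_neg at hk
      have hkn : min (max (y + 1) 0) n ≤ lo := hk
      have hyl : y < lo := by
        have : min (max (y + 1) 0) n < n := by omega
        have h1 : min (max (y + 1) 0) n = max (y + 1) 0 := by omega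
        omega
      have hhead : max lo y + 1 = lo + 1 := by omega
      have hcnt0 : (max (min (min (max (y + 1) 0) n) hi - lo) 0).toNat = 0 := by
        have : min (min (max (y + 1) 0) n) hi ≤ min (max (y + 1) 0) n := min_le_left _ _
        omega
      have hcnt0' : (max (min (min (max (y + 1) 0) n) hi - (lo + 1)) 0).toNat = 0 := by
        have : min (min (max (y + 1) 0) n) hi ≤ min (max (y + 1) 0) n := min_le_left _ _
        omega
      have hmax1 : max lo (min (max (y + 1) 0) n) = lo := by omega
      have hmax2 : max (lo + 1) (min (max (y + 1) 0) n) = lo + 1 := by omega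
      have htail := ih (lo + 1) hi (by omega) (by omega) hhin
      rw [hcnt0' , hmax2] at htail
      simp only [List.replicate_zero, List.nil_append] at htail
      rw [hcnt0, hmax1]
      simp only [List.replicate_zero, List.nil_append]
      rw [PySem.List.pyRange_one_cons (by omega : lo + 1 < hi + 1), htail, hhead]

-- Shift a column-window map to the flat-index map.
lemma shifted_map (n y lo hi : Int) (hn : 1 ≤ n) (hlo : 0 ≤ lo) (hhi : hi ≤ n) :
    (PySem.List.pyRange lo hi 1).map (fun x => max x y + 1)
      = (PySem.List.pyRange (n * y + lo) (n * y + hi) 1).map (fun i => max (i / n) (i % n) + 1) := by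
  rw [PySem.List.pyRange_one lo hi, PySem.List.pyRange_one (n * y + lo) (n * y + hi)]
  have hlen : (n * y + hi - (n * y + lo)).toNat = (hi - lo).toNat := by omega
  rw [hlen, List.map_map, List.map_map]
  apply List.map_congr_left
  intro j hj
  have hjlt : (j : Int) < hi - lo := by
    have := List.mem_range.mp hj
    omega
  have hx0 : 0 ≤ lo + (j : Int) := by positivity
  have hxn : lo + (j : Int) < n := by omega
  obtain ⟨hd, hm⟩ := row_divmod n y (lo + j) hn hx0 hxn
  simp only [Function.comp]
  rw [show n * y + lo + (j : Int) = n * y + (lo + j) by ring, hd, hm]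
  omega

-- Stitching the rows together.
lemma rows_eq_map (n : Int) (hn : 1 ≤ n) :
    ∀ (m : Nat) (left right : Int), left ≤ right → (right / n - left / n).toNat = m →
      (PySem.List.pyRange (left / n) (right / n + 1) 1).flatMap
        (fun y =>
          List.replicate (max (min (min (max (y + 1) 0) n)
                (if y = right / n then right % n + 1 else n)
              - (if y = left / n then left % n else 0)) 0).toNat (y + 1)
          ++ PySem.List.pyRange
              (max (if y = left / n then left % n else 0) (min (max (y + 1) 0) n) + 1)
              ((if y = right / n then right % n + 1 else n) + 1) 1)
      = (PySem.List.pyRange left (right + 1) 1).map (fun i => max (i / n) (i % n) + 1) := by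
  intro m
  induction m with
  | zero =>
    intro left right hlr hm
    have hfl : left / n ≤ right / n := Int.ediv_le_ediv (by omega) hlr
    have heq : right / n = left / n := by omega
    have hcons : PySem.List.pyRange (left / n) (left / n + 1) 1 = [left / n] :=
      PySem.List.pyRange_one_singleton _
    rw [heq, hcons]
    simp only [List.flatMap_cons, List.flatMap_nil, List.append_nil, if_true]
    have hml := Int.emod_nonneg left (by omega : n ≠ 0)
    have hmr := Int.emod_lt_of_pos right (by omega : (0:Int) < n)
    have el := Int.emod_add_ediv left n
    have er := Int.emod_add_ediv right n
    have hq : n * (left / n) = n * (right / n) := by rw [heq]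
    have hlohi : right % n + 1 - left % n = (right % n + 1 - left % n).toNat := by omega
    rw [piece_eq_map n (left / n) hn (right % n + 1 - left % n).toNat (left % n) (right % n + 1)
          hml (by omega) (by omega),
        shifted_map n (left / n) (left % n) (right % n + 1) hn hml (by omega)]
    have h1 : n * (left / n) + left % n = left := by omega
    have h2 : n * (left / n) + (right % n + 1) = right + 1 := by omega
    rw [h1, h2]
  | succ m ih =>
    intro left right hlr hm
    have hfl : left / n < right / n := by omega
    rw [PySem.List.pyRange_one_cons (by omega : left / n < right / n + 1), List.flatMap_cons]
    have hml := Int.emod_nonneg left (by omega : n ≠ 0)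
    have hml2 := Int.emod_lt_of_pos left (by omega : (0:Int) < n)
    have el := Int.emod_add_ediv left n
    have er := Int.emod_add_ediv right n
    have hmr := Int.emod_nonneg right (by omega : n ≠ 0)
    -- the first (possibly partial) row
    have hne : left / n ≠ right / n := by omega
    simp only [if_true, if_neg hne]
    rw [piece_eq_map n (left / n) hn (n - left % n).toNat (left % n) n hml (by omega) (by omega),
        shifted_map n (left / n) (left % n) n hn hml (by omega)]
    -- the remaining rows: instantiate IH at left' = n * (left / n + 1)
    set left' : Int := n * (left / n + 1) with hleft'
    have hquot : left' / n = left / n + 1 := by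
      rw [hleft', Int.mul_ediv_cancel_left _ (by omega : n ≠ 0)]
    have hrem : left' % n = 0 := by rw [hleft', Int.mul_emod_right]
    have hlr' : left' ≤ right := by
      have h1 : left / n + 1 ≤ right / n := by omega
      have h2 : n * (left / n + 1) ≤ n * (right / n) := by
        apply mul_le_mul_of_nonneg_left h1 (by omega)
      omega
    have hih := ih left' right hlr' (by omega)
    rw [hquot] at hih
    have hcongr :
        (PySem.List.pyRange (left / n + 1) (right / n + 1) 1).flatMap
          (fun y =>
            List.replicate (max (min (min (max (y + 1) 0) n)
                  (if y = right / n then right % n + 1 else n)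
                - (if y = left / n then left % n else 0)) 0).toNat (y + 1)
            ++ PySem.List.pyRange
                (max (if y = left / n then left % n else 0) (min (max (y + 1) 0) n) + 1)
                ((if y = right / n then right % n + 1 else n) + 1) 1)
        = (PySem.List.pyRange (left / n + 1) (right / n + 1) 1).flatMap
          (fun y =>
            List.replicate (max (min (min (max (y + 1) 0) n)
                  (if y = right / n then right % n + 1 else n)
                - (if y = left / n + 1 then left' % n else 0)) 0).toNat (y + 1)
            ++ PySem.List.pyRange
                (max (if y = left / n + 1 then left' % n else 0) (min (max (y + 1) 0) n) + 1)
                ((if y = right / n then right % n + 1 else n) + 1) 1) := by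
      apply List.flatMap_congr
      intro y hy
      have hy1 : left / n + 1 ≤ y := (PySem.List.mem_pyRange_one.mp hy).1
      have hyne : y ≠ left / n := by omega
      rw [if_neg hyne, hrem]
      by_cases h : y = left / n + 1 <;> simp [h]
    rw [hcongr, hih]
    have e1 : n * (left / n) + left % n = left := by omega
    have e2 : n * (left / n) + n = left' := by rw [hleft']; ring
    rw [e1, e2,
        PySem.List.pyRange_one_append left left' (right + 1) (by omega) (by omega),
        List.map_append]

theorem solution_spec : Claim_equal_solution := by
  intro n left right _ hpre
  unfold Spec_solution
  rcases hpre with hn | ⟨hn0, hlt⟩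
  case inr =>
    unfold solution solution_alt
    rw [if_pos hlt]
    have h1 : (right - left + 1).toNat = 0 := by omega
    rw [h1]
    simp
  by_cases hlt : right < left
  · unfold solution solution_alt
    rw [if_pos hlt]
    have h1 : (right - left + 1).toNat = 0 := by omega
    rw [h1]
    simp
  · replace hlt : left ≤ right := by omega
    rw [solution_eq_map n left right hn]
    unfold solution_alt
    rw [if_neg (by omega)]
    simp only []
    have h0 : (0:Int) < n := by omega
    simp only [PySem.Int.floordiv_eq_ediv_of_pos h0, PySem.Int.mod_eq_emod_of_pos h0]
    simp only [List.append_assoc]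
    rw [PySem.List.foldl_append_eq_flatMap]
    rw [rows_eq_map n hn (right / n - left / n).toNat left right hlt rfl]
    simp
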